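-- pv_equiv track=rewrite | github.com/lmadriles/rails | utils/graph_utils.py | get_projection
-- ===== SOURCE A (Python) =====
-- def get_projection(main_string, path):
--     path_set = set(path)
--     main_list = main_string.split()
--     result = []
--     prev = None
--
--     for i, station in enumerate(main_list):
--         if station in path_set:
--             if prev is not None and (i == 0 or main_list[i-1] != prev):
--                 result.append("|")
--             result.append(station)
--             prev = station
--
--     return result
-- ===== SOURCE B (Python) =====
-- def _runs(indices):
--     # split a list of indices into maximal runs of consecutive integers
--     if not indices:
--         return []
--     run = [indices[0]]
--     rest = indices[1:]
--     while rest and rest[0] == run[-1] + 1: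
--         run.append(rest[0])
--         rest = rest[1:]
--     return [run] + _runs(rest)
--
--
-- def get_projection(main_string, path):
--     path_set = set(path)
--     words = main_string.split()
--     matched = [i for i, w in enumerate(words) if w in path_set]
--     runs = _runs(matched)
--     if not runs:
--         return []
--     head, *rest = runs
--     out = [words[i] for i in head]
--     for run in rest:
--         out += ["|"] + [words[i] for i in run]
--     return out
-- ===== Notes on version B (the rewrite author's own statement) =====
-- stated objective: alternative
-- what changed: A is one fused pass that emits words and separators on the fly, remembering the previous matched word and re-reading main_list[i-1]; B is staged: it collects the matched indices, recursively groups them into maximal runs of consecutive indices (a list-of-runs structure), and finally joins the runs' words with '|' between runs (correct because any word equal to the previous matched station is itself in path_set, so A's value test coincides with index adjacency).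
import Mathlib
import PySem

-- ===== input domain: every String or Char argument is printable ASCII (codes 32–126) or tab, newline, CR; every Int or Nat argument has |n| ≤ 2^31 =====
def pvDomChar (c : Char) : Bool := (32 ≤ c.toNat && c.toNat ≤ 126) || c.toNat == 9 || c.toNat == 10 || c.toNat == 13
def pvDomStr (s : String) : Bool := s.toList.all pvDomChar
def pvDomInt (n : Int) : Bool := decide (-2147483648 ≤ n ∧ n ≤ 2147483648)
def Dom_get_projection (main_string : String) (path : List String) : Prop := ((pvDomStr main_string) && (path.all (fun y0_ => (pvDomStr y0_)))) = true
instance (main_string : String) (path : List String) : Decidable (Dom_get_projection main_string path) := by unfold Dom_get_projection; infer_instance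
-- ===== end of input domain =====

-- B replaces A's fused streaming pass (previous-word state, re-reading main_list[i-1]) by a staged
-- algorithm: collect matched indices, group them recursively into maximal consecutive runs, then
-- join the runs' words with "|" between runs; same return value on every input (both total).

-- ===== PORT A =====
-- loop body of A's single fused pass (reads main_list[i-1] via pyGet?, exact Python indexing)
def stepA (main_list : List String) (path_set : PySem.Set String)
    (st : List String × Option String) (p : Int × String) : List String × Option String :=
  let result := st.1
  let prev := st.2
  let i := p.1
  let station := p.2
  if path_set.contains station then
    let result := if prev.isSome && (i == 0 || !(PySem.List.pyGet? main_list (i - 1) == prev))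
      then result ++ ["|"] else result
    (result ++ [station], some station)
  else (result, prev)

def get_projection (main_string : String) (path : List String) : List String :=
  let path_set := PySem.Set.ofList path
  let main_list := PySem.Str.split₀ main_string
  ((PySem.List.enumerate main_list).foldl (stepA main_list path_set) ([], none)).1

-- ===== PORT B =====
-- words[i] for an index produced by enumerate (always in range)
def wordAt (words : List String) (i : Int) : String := PySem.List.pyGetD words i ""

-- the 'while rest and rest[0] == run[-1] + 1' loop of B's _runs: extends the current run
def spanRun (p : Int) : List Int → List Int × List Int
  | [] => ([], [])
  | i :: t =>
    if i = p + 1 then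
      let r := spanRun i t
      (i :: r.1, r.2)
    else ([], i :: t)

lemma spanRun_snd_length (p : Int) (l : List Int) : (spanRun p l).2.length ≤ l.length := by
  induction l generalizing p with
  | nil => simp [spanRun]
  | cons i t ih =>
    simp only [spanRun]
    split
    · exact Nat.le_succ_of_le (ih i)
    · simp

-- B's _runs: recursive grouping into maximal runs of consecutive indices
def groupRuns : List Int → List (List Int)
  | [] => []
  | h :: t =>
    let r := spanRun h t
    (h :: r.1) :: groupRuns r.2
termination_by l => l.length
decreasing_by
  exact Nat.lt_succ_of_le (spanRun_snd_length h t)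

-- B's final join: head run's words, then for each later run "|" ++ its words
def joinRuns (words : List String) (runs : List (List Int)) : List String :=
  match runs with
  | [] => []
  | h :: rest =>
    rest.foldl (fun acc run => acc ++ ("|" :: run.map (wordAt words))) (h.map (wordAt words))

def get_projection_alt (main_string : String) (path : List String) : List String :=
  let path_set := PySem.Set.ofList path
  let words := PySem.Str.split₀ main_string
  let matched := ((PySem.List.enumerate words).filter (fun p => path_set.contains p.2)).map (fun p => p.1)
  joinRuns words (groupRuns matched)

-- ===== PRECONDITION & SPEC =====
def Spec_get_projection (main_string : String) (path : List String) (out : List String) : Prop := out = get_projection_alt main_string path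
instance (main_string : String) (path : List String) (out : List String) : Decidable (Spec_get_projection main_string path out) := by unfold Spec_get_projection; infer_instance

-- ===== CLAIM (what is proved, stated in full; the proofs are below) =====
def Claim_equal_get_projection : Prop := ∀ (main_string : String) (path : List String), Dom_get_projection main_string path → Spec_get_projection main_string path (get_projection main_string path)

-- ===== LEMMAS AND PROOFS =====

-- proof intermediary: the streaming form of B's output after the first matched index,
-- emitting "|" exactly when the next index is not the successor of the previous one
def gTail (words : List String) (j : Int) : List Int → List String
  | [] => []
  | i :: t => (if i = j + 1 then [] else ["|"]) ++ wordAt words i :: gTail words i t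

-- proof intermediary: loop body of a streaming pass over the matched (index, word) pairs
def stepB (st : List String × Option Int) (p : Int × String) : List String × Option Int :=
  let result := match st.2 with
    | some j => if p.1 ≠ j + 1 then st.1 ++ ["|"] else st.1
    | none => st.1
  (result ++ [p.2], some p.1)

-- The loop invariant linking A's remembered word `prevA` with the remembered index `prevI`:
-- either nothing matched yet, or prevI = some j with ws[j] = the word prevA, j before the
-- current position s, and no word strictly between j and s is in the set S.
def LoopInv (ws : List String) (S : PySem.Set String) (s : Nat)
    (prevA : Option String) (prevI : Option Int) : Prop :=
  (prevA = none ∧ prevI = none) ∨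
    ∃ (j : Nat) (u : String), prevI = some ((j : Nat) : Int) ∧ prevA = some u ∧ j < s ∧
      ws[j]? = some u ∧ S.contains u = true ∧
      ∀ k : Nat, j < k → k < s → ∀ x, ws[k]? = some x → S.contains x = false

lemma fold_eq (ws : List String) (S : PySem.Set String) :
    ∀ (ws' : List String) (s : Nat) (res : List String)
      (prevA : Option String) (prevI : Option Int),
      ws.drop s = ws' → LoopInv ws S s prevA prevI →
      ((PySem.List.enumerate ws' (s : Int)).foldl (stepA ws S) (res, prevA)).1 =
        (((PySem.List.enumerate ws' (s : Int)).filter (fun p => S.contains p.2)).foldl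
          stepB (res, prevI)).1 := by
  intro ws'
  induction ws' with
  | nil => intro s res prevA prevI _ _; simp [PySem.List.enumerate_nil]
  | cons w t ih =>
    intro s res prevA prevI hdrop hinv
    have hw : ws[s]? = some w := by
      have := congrArg (fun l : List String => l[0]?) hdrop
      simpa using this
    have hdrop' : ws.drop (s + 1) = t := by
      have : ws.drop (s + 1) = (ws.drop s).drop 1 := by
        rw [List.drop_drop]
      simp [this, hdrop]
    rw [PySem.List.enumerate_cons]
    have hcast : (s : Int) + 1 = ((s + 1 : Nat) : Int) := by push_cast; ring
    by_cases hc : S.contains w = true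
    · -- matched: both sides consume (s, w)
      have hcm : w ∈ S := by simpa using hc
      have hinv' : LoopInv ws S (s + 1) (some w) (some ((s : Nat) : Int)) := by
        right
        exact ⟨s, w, rfl, rfl, by omega, hw, hc, fun k hk1 hk2 => by omega⟩
      have hstep :
          stepA ws S (res, prevA) ((s : Int), w) =
            ((stepB (res, prevI) ((s : Int), w)).1, some w) := by
        rcases hinv with ⟨hA, hI⟩ | ⟨j, u, hI, hA, hjs, hj, hu, hbetween⟩
        · subst hA; subst hI
          simp [stepA, stepB, hcm]
        · subst hA; subst hI
          have hsnz : ¬((s : Int) = 0) := by omega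
          have hidx : (s : Int) - 1 = ((s - 1 : Nat) : Int) := by omega
          by_cases hadj : s = j + 1
          · -- adjacent: no separator on either side
            have hBeq : (s : Int) = (j : Int) + 1 := by omega
            simp [stepA, stepB, hcm, hBeq]
            exact ⟨by omega, hj⟩
          · -- gap: separator on both sides
            have hne : PySem.List.pyGet? ws ((s : Int) - 1) ≠ some u := by
              rw [hidx, PySem.List.pyGet?_natCast]
              cases hx : ws[s - 1]? with
              | none => simp
              | some x =>
                have hxS : S.contains x = false := hbetween (s - 1) (by omega) (by omega) x hx
                intro hcontra
                rw [Option.some_inj] at hcontra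
                rw [hcontra] at hxS
                rw [hxS] at hu
                exact absurd hu (by simp)
            have hBcond : ¬((s : Int) = (j : Int) + 1) := by
              intro h; apply hadj; omega
            simp [stepA, stepB, hcm, hne, hBcond]
      have := ih (s + 1) (stepB (res, prevI) ((s : Int), w)).1 (some w)
        (some ((s : Nat) : Int)) hdrop' hinv'
      simp only [List.filter_cons, hc, if_true, List.foldl_cons, hstep]
      rw [hcast]
      have hB : stepB (res, prevI) ((s : Int), w) =
          ((stepB (res, prevI) ((s : Int), w)).1, some ((s : Nat) : Int)) := by
        simp [stepB]
      rw [hB]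
      exact this
    · -- not matched: A leaves the state alone, filter drops the pair
      have hc' : S.contains w = false := by simpa using hc
      have hwm : w ∉ S := by simpa using hc'
      have hinv' : LoopInv ws S (s + 1) prevA prevI := by
        rcases hinv with ⟨hA, hI⟩ | ⟨j, u, hI, hA, hjs, hj, hu, hbetween⟩
        · exact Or.inl ⟨hA, hI⟩
        · refine Or.inr ⟨j, u, hI, hA, by omega, hj, hu, ?_⟩
          intro k hk1 hk2 x hx
          by_cases hks : k = s
          · subst hks
            rw [hw] at hx
            rw [Option.some_inj] at hx
            subst hx
            exact hc'
          · exact hbetween k hk1 (by omega) x hx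
      have := ih (s + 1) res prevA prevI hdrop' hinv'
      simp only [List.filter_cons, hc', List.foldl_cons]
      have hAstep : stepA ws S (res, prevA) ((s : Int), w) = (res, prevA) := by
        simp [stepA, hwm]
      rw [hAstep, hcast]
      simpa using this

-- every pair of the enumeration is (i, words[i])
lemma enum_snd_eq (ws : List String) (p : Int × String)
    (hp : p ∈ PySem.List.enumerate ws 0) : p.2 = wordAt ws p.1 := by
  rcases (PySem.List.mem_enumerate_iff _ _ _).1 hp with ⟨k, hk, hpe⟩
  subst hpe
  simp [wordAt, PySem.List.pyGetD_natCast, List.getD_eq_getElem?_getD, hk]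

-- the fold over acc ++ f run is init ++ flatMap
lemma foldl_app (f : List Int → List String) :
    ∀ (rs : List (List Int)) (init : List String),
      rs.foldl (fun acc run => acc ++ f run) init = init ++ rs.flatMap f := by
  intro rs
  induction rs with
  | nil => intro init; simp
  | cons r t ih => intro init; simp [List.foldl_cons, ih, List.flatMap_cons]

-- the streaming pass over matched pairs computes res ++ gTail over the indices
lemma stepB_fold (ws : List String) :
    ∀ (ps : List (Int × String)), (∀ p ∈ ps, p.2 = wordAt ws p.1) →
      ∀ (res : List String) (j : Int),
        (ps.foldl stepB (res, some j)).1 = res ++ gTail ws j (ps.map (fun p => p.1)) := by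
  intro ps
  induction ps with
  | nil => intro _ res j; simp [gTail]
  | cons p t ih =>
    intro hmem res j
    have hp2 : p.2 = wordAt ws p.1 := hmem p (by simp)
    have hstep : stepB (res, some j) p =
        (res ++ ((if p.1 = j + 1 then [] else ["|"]) ++ [wordAt ws p.1]), some p.1) := by
      by_cases h : p.1 = j + 1 <;> simp [stepB, h, hp2]
    rw [List.foldl_cons, hstep,
      ih (fun q hq => hmem q (by simp [hq])) _ p.1]
    simp [gTail]

-- grouping then flat-joining the tail runs equals the streaming gTail
lemma span_g (ws : List String) :
    ∀ (t : List Int) (p : Int),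
      ((spanRun p t).1.map (wordAt ws)) ++
        (groupRuns (spanRun p t).2).flatMap (fun run => "|" :: run.map (wordAt ws)) =
        gTail ws p t := by
  intro t
  induction t with
  | nil => intro p; simp [spanRun, groupRuns, gTail]
  | cons i t' ih =>
    intro p
    by_cases h : i = p + 1
    · subst h
      have hspan : spanRun p ((p + 1) :: t') =
          ((p + 1) :: (spanRun (p + 1) t').1, (spanRun (p + 1) t').2) := by
        simp [spanRun]
      rw [hspan]
      simp only [List.map_cons, List.cons_append]
      rw [ih (p + 1)]
      simp [gTail]
    · have hspan : spanRun p (i :: t') = ([], i :: t') := by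
        simp [spanRun, h]
      rw [hspan]
      rw [groupRuns]
      simp only [gTail, if_neg h, List.map_nil, List.nil_append, List.flatMap_cons,
        List.map_cons, List.cons_append]
      rw [← ih i]

-- joinRuns ∘ groupRuns equals the streaming pass, for a nonempty index list
lemma join_group (ws : List String) (i : Int) (t : List Int) :
    joinRuns ws (groupRuns (i :: t)) = wordAt ws i :: gTail ws i t := by
  rw [groupRuns]
  simp only [joinRuns]
  rw [foldl_app]
  simp only [List.map_cons, List.cons_append]
  rw [span_g ws t i]

-- the whole streaming pass from the empty state equals join ∘ group over the indices
lemma stepB_fold_none (ws : List String) (ps : List (Int × String))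
    (hmem : ∀ p ∈ ps, p.2 = wordAt ws p.1) :
    (ps.foldl stepB ([], none)).1 = joinRuns ws (groupRuns (ps.map (fun p => p.1))) := by
  cases ps with
  | nil => simp [groupRuns, joinRuns]
  | cons p t =>
    have hstep0 : stepB ([], none) p = ([p.2], some p.1) := by simp [stepB]
    rw [List.foldl_cons, hstep0,
      stepB_fold ws t (fun q hq => hmem q (by simp [hq])) [p.2] p.1]
    have hp2 : p.2 = wordAt ws p.1 := hmem p (by simp)
    rw [List.map_cons, join_group ws p.1 (t.map (fun p => p.1))]
    simp [hp2]

-- A's fold equals B's staged computation, for any word list and set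
lemma main_eq (ws : List String) (S : PySem.Set String) :
    ((PySem.List.enumerate ws).foldl (stepA ws S) ([], none)).1 =
      joinRuns ws (groupRuns
        (((PySem.List.enumerate ws).filter (fun p => S.contains p.2)).map (fun p => p.1))) := by
  have hws := fold_eq ws S ws 0 [] none none (by simp) (Or.inl ⟨rfl, rfl⟩)
  have hmem : ∀ p ∈ (PySem.List.enumerate ws).filter (fun p => S.contains p.2),
      p.2 = wordAt ws p.1 := by
    intro p hp
    exact enum_snd_eq ws p (List.mem_filter.1 hp).1
  have hnone := stepB_fold_none ws
    ((PySem.List.enumerate ws).filter (fun p => S.contains p.2)) hmem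
  simp only [Nat.cast_zero] at hws
  exact hws.trans hnone

-- ===== VERDICT (by name: the statement is the Claim_ definition above) =====
theorem get_projection_spec : Claim_equal_get_projection := by
  intro main_string path _
  unfold Spec_get_projection get_projection get_projection_alt
  exact main_eq (PySem.Str.split₀ main_string) (PySem.Set.ofList path)
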